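-- pv_equiv track=rewrite | github.com/mirko-x/Algorithms | Dynamic Programming/PD2.py | dispadjg
-- ===== SOURCE A (Python) =====
-- def dispadjg(n,k):
--     T=[[0]*k for _ in range(n+1)]
--     for j in range(k):
--         T[1][j]=1
--     for i in range(2,n+1):
--         for j in range(k):
--            if j%2:
--                T[i][j]=T[i-1][j-1]*2
--
--            else: T[i][j]=sum(T[i-1])
--
--     return T,sum(T[n])
-- ===== SOURCE B (Python) =====
-- def dispadjg(n, k):
--     # Scalar recurrence for the row sums: S[0]=1, S[1]=k, S[i]=e*S[i-1]+2*o*S[i-2],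
--     # where e/o count the even/odd columns. Rows are then written wholesale.
--     kk = max(k, 0)
--     e, o = (kk + 1) // 2, kk // 2
--     S = [1, kk]
--     for i in range(2, n + 1):
--         S.append(e * S[i - 1] + 2 * o * S[i - 2])
--
--     def row(i):
--         if i == 0:
--             return [0] * kk
--         if i == 1:
--             return [1] * kk
--         return [2 * S[i - 2] if j % 2 else S[i - 1] for j in range(kk)]
--
--     T = [row(i) for i in range(n + 1)]
--     return T, sum(T[n])
-- ===== Notes on version B (the rewrite author's own statement) =====
-- stated objective: faster
-- what changed: Replaces the cell-by-cell table fill (which recomputes the whole previous row's sum for every even cell) by first computing the scalar row-sum sequence S_i = e*S_{i-1} + 2*o*S_{i-2} (e=(k+1)//2 even columns, o=k//2 odd columns, S_0=1, S_1=k) and then building each row as a pure comprehension: even columns S_{i-1}, odd columns 2*S_{i-2}.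
import Mathlib
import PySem

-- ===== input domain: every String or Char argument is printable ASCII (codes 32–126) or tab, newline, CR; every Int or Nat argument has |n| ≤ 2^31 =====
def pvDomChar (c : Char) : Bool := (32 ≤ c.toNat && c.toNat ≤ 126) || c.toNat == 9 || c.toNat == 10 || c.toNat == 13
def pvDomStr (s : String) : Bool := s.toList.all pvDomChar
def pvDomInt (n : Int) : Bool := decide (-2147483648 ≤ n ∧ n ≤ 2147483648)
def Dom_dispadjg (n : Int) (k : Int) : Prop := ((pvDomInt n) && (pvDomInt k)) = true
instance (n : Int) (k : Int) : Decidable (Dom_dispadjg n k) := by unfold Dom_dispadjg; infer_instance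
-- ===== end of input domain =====

-- B replaces A's cell-by-cell fill (which re-sums the previous row for every even cell)
-- by a scalar row-sum recurrence, then writes each row wholesale: asymptotically faster.

-- ===== PORT A =====
-- sum(xs) : Python's sum is a left fold with initial 0
def pvSum (xs : List Int) : Int := xs.foldl (· + ·) 0

-- literal transliteration of A
def dispadjg (n : Int) (k : Int) : List (List Int) × Int :=
  -- T=[[0]*k for _ in range(n+1)]
  let T : List (List Int) := (PySem.List.pyRange 0 (n+1) 1).map (fun _ => PySem.List.pyRepeat [(0:Int)] k)
  -- for j in range(k): T[1][j]=1
  let T := (PySem.List.pyRange 0 k 1).foldl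
    (fun T j => PySem.List.pySetD T 1 (PySem.List.pySetD (PySem.List.pyGetD T 1 []) j 1)) T
  -- for i in range(2,n+1): for j in range(k): …
  let T := (PySem.List.pyRange 2 (n+1) 1).foldl (fun T i =>
    (PySem.List.pyRange 0 k 1).foldl (fun T j =>
      if PySem.Int.mod j 2 ≠ 0 then
        PySem.List.pySetD T i (PySem.List.pySetD (PySem.List.pyGetD T i [])
          j (PySem.List.pyGetD (PySem.List.pyGetD T (i-1) []) (j-1) 0 * 2))
      else
        PySem.List.pySetD T i (PySem.List.pySetD (PySem.List.pyGetD T i [])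
          j (pvSum (PySem.List.pyGetD T (i-1) [])))) T) T
  (T, pvSum (PySem.List.pyGetD T n []))

-- ===== PORT B =====
-- literal transliteration of B (Source B)
def dispadjg_alt (n : Int) (k : Int) : List (List Int) × Int :=
  let kk := max k 0
  let e := PySem.Int.floordiv (kk + 1) 2
  let o := PySem.Int.floordiv kk 2
  -- S=[1,kk]; for i in range(2,n+1): S.append(e*S[i-1]+2*o*S[i-2])
  let S := (PySem.List.pyRange 2 (n+1) 1).foldl
    (fun S i => S ++ [e * PySem.List.pyGetD S (i-1) 0 + 2 * o * PySem.List.pyGetD S (i-2) 0])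
    [1, kk]
  -- def row(i): …
  let row : Int → List Int := fun i =>
    if i = 0 then PySem.List.pyRepeat [(0:Int)] kk
    else if i = 1 then PySem.List.pyRepeat [(1:Int)] kk
    else (PySem.List.pyRange 0 kk 1).map
      (fun j => if PySem.Int.mod j 2 ≠ 0 then 2 * PySem.List.pyGetD S (i-2) 0
                else PySem.List.pyGetD S (i-1) 0)
  -- T = [row(i) for i in range(n+1)]
  let T := (PySem.List.pyRange 0 (n+1) 1).map row
  (T, pvSum (PySem.List.pyGetD T n []))

-- ===== PRECONDITION & SPEC =====
-- Pre_ excludes exactly the inputs where A raises IndexError: n < 0 (T[n] / T[1] out of range)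
-- and n = 0 with k > 0 (T[1] does not exist).
def Pre_dispadjg (n : Int) (k : Int) : Prop := 0 ≤ n ∧ (0 < k → 1 ≤ n)
instance (n : Int) (k : Int) : Decidable (Pre_dispadjg n k) := by unfold Pre_dispadjg; infer_instance
def pvWitness_dispadjg : Int × Int := (3, 4)


def Spec_dispadjg (n : Int) (k : Int) (out : List (List Int) × Int) : Prop := out = dispadjg_alt n k
instance (n : Int) (k : Int) (out : List (List Int) × Int) : Decidable (Spec_dispadjg n k out) := by unfold Spec_dispadjg; infer_instance

-- ===== CLAIM (what is proved, stated in full; the proofs are below) =====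
def Claim_equal_dispadjg : Prop := ∀ (n : Int) (k : Int), Dom_dispadjg n k → Pre_dispadjg n k → Spec_dispadjg n k (dispadjg n k)


-- ===== LEMMAS AND PROOFS =====

-- canonical objects: row-sum sequence, closed row description, table prefix
def pvSeq (k : Int) : Nat → Int
  | 0 => 1
  | 1 => max k 0
  | (i+2) => PySem.Int.floordiv (max k 0 + 1) 2 * pvSeq k (i+1) +
             2 * PySem.Int.floordiv (max k 0) 2 * pvSeq k i

def pvRowF (k : Int) : Nat → List Int
  | 0 => List.replicate k.toNat 0
  | 1 => List.replicate k.toNat 1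
  | (i+2) => (List.range k.toNat).map
      (fun j => if j % 2 = 1 then 2 * pvSeq k i else pvSeq k (i+1))

def pvRowA (prev : List Int) (m : Nat) : List Int :=
  (List.range m).map
    (fun (t : Nat) => if t % 2 = 1 then PySem.List.pyGetD prev ((t:Int)-1) 0 * 2 else pvSum prev)

-- generic list surgery helpers
theorem lset_app {α : Type} : ∀ (xs : List α) (y : α) (ys : List α) (v : α),
    (xs ++ y :: ys).set xs.length v = xs ++ v :: ys := by
  intro xs; induction xs with
  | nil => intro y ys v; rfl
  | cons a t ih => intro y ys v; simp

theorem lgetD_app {α : Type} : ∀ (xs : List α) (y : α) (ys : List α) (d : α),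
    (xs ++ y :: ys).getD xs.length d = y := by
  intro xs; induction xs with
  | nil => intro y ys d; rfl
  | cons a t ih => intro y ys d; simp

theorem pv_max_eq_cast (k : Int) : max k 0 = (k.toNat : Int) := by
  by_cases h : k ≤ 0
  · simp [Int.toNat_of_nonpos h, max_eq_right h]
  · rw [Int.toNat_of_nonneg (by omega), max_eq_left (by omega)]

theorem pv_pyRange_k (k : Int) : PySem.List.pyRange 0 k = PySem.List.pyRange 0 (k.toNat : Int) := by
  by_cases h : k ≤ 0
  · rw [PySem.List.pyRange_one_eq_nil h,
        PySem.List.pyRange_one_eq_nil (by simp [Int.toNat_of_nonpos h])]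
  · rw [Int.toNat_of_nonneg (by omega)]

theorem pvSum_append_singleton (xs : List Int) (x : Int) : pvSum (xs ++ [x]) = pvSum xs + x := by
  simp [pvSum]

theorem pvSum_if_map (a b : Int) : ∀ (m : Nat),
    pvSum ((List.range m).map (fun j => if j % 2 = 1 then a else b))
      = ((m/2 : Nat) : Int) * a + (((m+1)/2 : Nat) : Int) * b := by
  intro m; induction m with
  | zero => simp [pvSum]
  | succ t ih =>
      rw [List.range_succ, List.map_append]
      simp only [List.map_cons, List.map_nil]
      rw [pvSum_append_singleton, ih]
      rcases Nat.even_or_odd t with ⟨s, hs⟩ | ⟨s, hs⟩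
      · subst hs
        have h1 : (s + s) % 2 = 0 := by omega
        have h2 : (s + s) / 2 = s := by omega
        have h3 : (s + s + 1) / 2 = s := by omega
        have h4 : (s + s + 1 + 1) / 2 = s + 1 := by omega
        simp only [h1, h2, h3, h4]
        norm_num; ring
      · subst hs
        have h1 : (2*s + 1) % 2 = 1 := by omega
        have h2 : (2*s + 1) / 2 = s := by omega
        have h3 : (2*s + 1 + 1) / 2 = s + 1 := by omega
        have h4 : (2*s + 1 + 1 + 1) / 2 = s + 1 := by omega
        simp only [h1, h2, h3, h4]
        norm_num; ring

theorem pvSum_replicate_one (m : Nat) : pvSum (List.replicate m (1:Int)) = (m : Int) := by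
  induction m with
  | zero => rfl
  | succ t ih => rw [List.replicate_succ', pvSum_append_singleton, ih]; push_cast; ring

theorem pvSum_rowF (k : Int) : ∀ (i : Nat), pvSum (pvRowF k (i+1)) = pvSeq k (i+1) := by
  intro i
  match i with
  | 0 => rw [show pvRowF k 1 = List.replicate k.toNat 1 from rfl, pvSum_replicate_one,
             show pvSeq k 1 = max k 0 from rfl, pv_max_eq_cast]
  | (r+1) =>
      show pvSum (pvRowF k (r+2)) = pvSeq k (r+2)
      rw [show pvRowF k (r+2) = (List.range k.toNat).map
            (fun j => if j % 2 = 1 then 2 * pvSeq k r else pvSeq k (r+1)) from rfl,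
          pvSum_if_map,
          show pvSeq k (r+2) = PySem.Int.floordiv (max k 0 + 1) 2 * pvSeq k (r+1) +
             2 * PySem.Int.floordiv (max k 0) 2 * pvSeq k r from rfl, pv_max_eq_cast]
      have he : PySem.Int.floordiv ((k.toNat:Int) + 1) 2 = (((k.toNat+1)/2 : Nat) : Int) := by
        exact_mod_cast PySem.Int.floordiv_natCast (k.toNat+1) 2
      have ho : PySem.Int.floordiv ((k.toNat:Int)) 2 = (((k.toNat)/2 : Nat) : Int) := by
        exact_mod_cast PySem.Int.floordiv_natCast (k.toNat) 2
      rw [he, ho]; ring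

theorem pv_get_rowF_even (k : Int) (r j : Nat) (hj : j < k.toNat) (he : j % 2 = 0) :
    (pvRowF k (r+1)).getD j 0 = pvSeq k r := by
  match r with
  | 0 =>
      rw [show pvRowF k 1 = List.replicate k.toNat 1 from rfl]
      rw [List.getD_eq_getElem?_getD, List.getElem?_replicate]
      simp [hj, show pvSeq k 0 = 1 from rfl]
  | (s+1) =>
      rw [show pvRowF k (s+2) = (List.range k.toNat).map
            (fun j => if j % 2 = 1 then 2 * pvSeq k s else pvSeq k (s+1)) from rfl,
          PySem.List.getD_map_range _ _ _ _ hj]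
      simp [show ¬ (j % 2 = 1) by omega]

-- the value assigned by A's inner loop at column t equals (pvRowA prev m)[t]
theorem pvRowA_get (prev : List Int) (m t : Nat) (ht : t < m) :
    (pvRowA prev m).getD t 0
      = if t % 2 = 1 then PySem.List.pyGetD prev ((t:Int)-1) 0 * 2 else pvSum prev := by
  rw [pvRowA, PySem.List.getD_map_range _ _ _ _ ht]

theorem pvRowA_length (prev : List Int) (m : Nat) : (pvRowA prev m).length = m := by
  simp [pvRowA]

theorem pvRowA_eq_rowF (k : Int) (r : Nat) :
    pvRowA (pvRowF k (r+1)) k.toNat = pvRowF k (r+2) := by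
  rw [pvRowA, show pvRowF k (r+2) = (List.range k.toNat).map
        (fun j => if j % 2 = 1 then 2 * pvSeq k r else pvSeq k (r+1)) from rfl]
  apply List.map_congr_left
  intro t htm
  rw [List.mem_range] at htm
  by_cases ht : t % 2 = 1
  · have h1 : ((t:Int) - 1) = ((t - 1 : Nat) : Int) := by omega
    rw [if_pos ht, if_pos ht, h1, PySem.List.pyGetD_natCast,
        pv_get_rowF_even k r (t-1) (by omega) (by omega)]
    ring
  · rw [if_neg ht, if_neg ht, pvSum_rowF]
theorem pv_mod2 (s : Nat) : PySem.Int.mod (s:Int) 2 = ((s % 2 : Nat) : Int) := by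
  exact_mod_cast PySem.Int.mod_natCast s 2

-- indexing/assignment at small literal indices
theorem pv_set1 {α : Type} (a r : α) (rest : List α) (v : α) :
    PySem.List.pySetD (a :: r :: rest) 1 v = a :: v :: rest := by
  simp [PySem.List.pySetD, PySem.List.pySet?, PySem.List.pyIdx?]

theorem pv_get1 (a r : List Int) (rest : List (List Int)) :
    PySem.List.pyGetD (a :: r :: rest) 1 [] = r := by
  simp [PySem.List.pyGetD, PySem.List.pyIdx?, PySem.List.pyGet?]

-- the shared 'for j in range(k): T[1][j]=1' loop
theorem pv_onesAux (a : List Int) (rest : List (List Int)) (m : Nat) :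
    ∀ (t : Nat), t ≤ m →
    (List.range t).foldl
      (fun T (j : Nat) =>
        PySem.List.pySetD T 1 (PySem.List.pySetD (PySem.List.pyGetD T 1 []) (j:Int) 1))
      (a :: List.replicate m 0 :: rest)
    = a :: (List.replicate t 1 ++ List.replicate (m-t) 0) :: rest := by
  intro t; induction t with
  | zero => intro _; simp
  | succ s ih =>
      intro hs
      rw [List.range_succ, List.foldl_append, ih (by omega)]
      simp only [List.foldl_cons, List.foldl_nil]
      rw [pv_get1, PySem.List.pySetD_natCast, pv_set1]
      have hrow : (List.replicate s (1:Int) ++ List.replicate (m-s) 0).set s 1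
          = List.replicate (s+1) 1 ++ List.replicate (m-(s+1)) 0 := by
        rw [show m - s = (m-s-1)+1 by omega, List.replicate_succ]
        have hl := lset_app (List.replicate s (1:Int)) 0 (List.replicate (m-s-1) 0) 1
        rw [List.length_replicate] at hl
        rw [hl, List.replicate_succ' (n := s)]
        simp [show m - (s+1) = m - s - 1 by omega]
      rw [hrow]

theorem pv_onesLoop (k : Int) (a : List Int) (rest : List (List Int)) :
    (PySem.List.pyRange 0 k 1).foldl
      (fun T j => PySem.List.pySetD T 1 (PySem.List.pySetD (PySem.List.pyGetD T 1 []) j 1))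
      (a :: List.replicate k.toNat 0 :: rest)
    = a :: List.replicate k.toNat 1 :: rest := by
  rw [pv_pyRange_k, PySem.List.pyRange_zero_natCast, List.foldl_map]
  have h := pv_onesAux a rest k.toNat k.toNat (le_refl _)
  simpa using h

-- A's inner loop: fills row at index P.length + 1 cell by cell from 'prev'
theorem pv_innerAux (P : List (List Int)) (prev cur : List Int) (rest : List (List Int))
    (m : Nat) (hc : cur.length = m) :
    ∀ (t : Nat), t ≤ m →
    (List.range t).foldl
      (fun T (j : Nat) =>
        if PySem.Int.mod (j:Int) 2 ≠ 0 then
          PySem.List.pySetD T ((P.length : Int) + 1)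
            (PySem.List.pySetD (PySem.List.pyGetD T ((P.length : Int) + 1) [])
              (j:Int) (PySem.List.pyGetD
                (PySem.List.pyGetD T (((P.length : Int) + 1) - 1) []) ((j:Int)-1) 0 * 2))
        else
          PySem.List.pySetD T ((P.length : Int) + 1)
            (PySem.List.pySetD (PySem.List.pyGetD T ((P.length : Int) + 1) [])
              (j:Int) (pvSum (PySem.List.pyGetD T (((P.length : Int) + 1) - 1) []))))
      (P ++ prev :: cur :: rest)
    = P ++ prev :: ((pvRowA prev m).take t ++ cur.drop t) :: rest := by
  intro t; induction t with
  | zero => intro _; simp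
  | succ s ih =>
      intro hs
      rw [List.range_succ, List.foldl_append, ih (by omega)]
      simp only [List.foldl_cons, List.foldl_nil]
      set r := (pvRowA prev m).take s ++ cur.drop s with hr
      have hidx1 : ((P.length : Int) + 1) = (((P.length + 1 : Nat)) : Int) := by omega
      have hidx0 : (((P.length : Int) + 1) - 1) = ((P.length : Nat) : Int) := by omega
      have hsplit : P ++ prev :: r :: rest = (P ++ [prev]) ++ r :: rest := by simp
      have hget1 : PySem.List.pyGetD (P ++ prev :: r :: rest) ((P.length : Int) + 1) [] = r := by
        rw [hidx1, PySem.List.pyGetD_natCast, hsplit,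
            show P.length + 1 = (P ++ [prev]).length by simp, lgetD_app]
      have hget0 : PySem.List.pyGetD (P ++ prev :: r :: rest) (((P.length : Int) + 1) - 1) []
          = prev := by
        rw [hidx0, PySem.List.pyGetD_natCast, lgetD_app]
      have hval : ∀ v : List Int,
          PySem.List.pySetD (P ++ prev :: r :: rest) ((P.length : Int) + 1) v
            = P ++ prev :: v :: rest := by
        intro v
        rw [hidx1, PySem.List.pySetD_natCast, hsplit,
            show P.length + 1 = (P ++ [prev]).length by simp, lset_app]
        simp
      have hscur : s < cur.length := by omega
      have hsets : ∀ v : Int, PySem.List.pySetD r ((s:Int)) v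
          = (pvRowA prev m).take s ++ v :: cur.drop (s+1) := by
        intro v
        have hl := lset_app ((pvRowA prev m).take s) (cur[s]'hscur) (cur.drop (s+1)) v
        have hlen' : ((pvRowA prev m).take s).length = s := by
          rw [List.length_take, pvRowA_length]; omega
        rw [hlen'] at hl
        rw [PySem.List.pySetD_natCast, hr, List.drop_eq_getElem_cons hscur, hl]
      have htake : ∀ v : Int, v = (pvRowA prev m).getD s 0 →
          (pvRowA prev m).take s ++ v :: cur.drop (s+1)
            = (pvRowA prev m).take (s+1) ++ cur.drop (s+1) := by
        intro v hv
        have hsl : s < (pvRowA prev m).length := by rw [pvRowA_length]; omega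
        rw [hv, List.getD_eq_getElem _ _ hsl, List.take_succ_eq_append_getElem hsl,
            List.append_assoc, List.singleton_append]
      by_cases hpar : s % 2 = 1
      · rw [if_pos (by rw [pv_mod2]; omega : PySem.Int.mod (s:Int) 2 ≠ 0)]
        rw [hget1, hget0, hsets, hval,
            htake _ (by rw [pvRowA_get prev m s (by omega), if_pos hpar])]
      · rw [if_neg (by rw [pv_mod2]; omega : ¬ PySem.Int.mod (s:Int) 2 ≠ 0)]
        rw [hget1, hget0, hsets, hval,
            htake _ (by rw [pvRowA_get prev m s (by omega), if_neg hpar])]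

theorem pv_innerA (k : Int) (P : List (List Int)) (prev cur : List Int)
    (rest : List (List Int)) (hc : cur.length = k.toNat) :
    (PySem.List.pyRange 0 k 1).foldl
      (fun T j =>
        if PySem.Int.mod j 2 ≠ 0 then
          PySem.List.pySetD T ((P.length : Int) + 1)
            (PySem.List.pySetD (PySem.List.pyGetD T ((P.length : Int) + 1) [])
              j (PySem.List.pyGetD
                (PySem.List.pyGetD T (((P.length : Int) + 1) - 1) []) (j-1) 0 * 2))
        else
          PySem.List.pySetD T ((P.length : Int) + 1)
            (PySem.List.pySetD (PySem.List.pyGetD T ((P.length : Int) + 1) [])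
              j (pvSum (PySem.List.pyGetD T (((P.length : Int) + 1) - 1) []))))
      (P ++ prev :: cur :: rest)
    = P ++ prev :: pvRowA prev k.toNat :: rest := by
  rw [pv_pyRange_k, PySem.List.pyRange_zero_natCast, List.foldl_map]
  have h := pv_innerAux P prev cur rest k.toNat hc k.toNat (le_refl _)
  rw [h, List.take_of_length_le (by rw [pvRowA_length]), List.drop_of_length_le (by omega)]
  simp
-- A's outer loop invariant
theorem pv_outerA (k : Int) : ∀ (c q : Nat), c ≤ q →
    (List.range c).foldl
      (fun T (t : Nat) =>
        (PySem.List.pyRange 0 k 1).foldl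
          (fun T j =>
            if PySem.Int.mod j 2 ≠ 0 then
              PySem.List.pySetD T (2+(t:Int))
                (PySem.List.pySetD (PySem.List.pyGetD T (2+(t:Int)) []) j
                  (PySem.List.pyGetD (PySem.List.pyGetD T ((2+(t:Int))-1) []) (j-1) 0 * 2))
            else
              PySem.List.pySetD T (2+(t:Int))
                (PySem.List.pySetD (PySem.List.pyGetD T (2+(t:Int)) []) j
                  (pvSum (PySem.List.pyGetD T ((2+(t:Int))-1) []))))
          T)
      ((List.range 2).map (pvRowF k) ++ List.replicate q (List.replicate k.toNat 0))
    = (List.range (c+2)).map (pvRowF k) ++ List.replicate (q-c) (List.replicate k.toNat 0) := by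
  intro c; induction c with
  | zero => intro q _; simp
  | succ s ih =>
      intro q hq
      rw [show List.range (s+1) = List.range s ++ [s] from List.range_succ,
          List.foldl_append, ih q (by omega)]
      simp only [List.foldl_cons, List.foldl_nil]
      have hrep : List.replicate (q-s) (List.replicate k.toNat (0:Int))
          = List.replicate k.toNat 0 :: List.replicate (q-s-1) (List.replicate k.toNat 0) := by
        rw [show q - s = (q-s-1)+1 by omega]; simp [List.replicate_succ]
      rw [hrep, show (List.range (s+2)).map (pvRowF k)
            = (List.range (s+1)).map (pvRowF k) ++ [pvRowF k (s+1)] by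
          rw [List.range_succ, List.map_append]; rfl]
      have hlen : (2 + (s:Int)) = ((((List.range (s+1)).map (pvRowF k)).length : Int) + 1) := by
        simp; omega
      rw [hlen, List.append_assoc, List.cons_append, List.nil_append,
          pv_innerA k _ _ _ _ (by simp),
          pvRowA_eq_rowF k s]
      rw [show (List.range (s+1+2)).map (pvRowF k)
            = (List.range (s+1)).map (pvRowF k) ++ [pvRowF k (s+1), pvRowF k (s+2)] by
          rw [List.range_succ, List.range_succ, List.map_append, List.map_append]
          simp]
      simp [show q - (s+1) = q - s - 1 by omega]

-- B's S-list loop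
theorem pv_SAux (k : Int) : ∀ (c : Nat),
    (List.range c).foldl
      (fun S (t : Nat) => S ++ [PySem.Int.floordiv (max k 0 + 1) 2 *
           PySem.List.pyGetD S ((2+(t:Int))-1) 0 +
           2 * PySem.Int.floordiv (max k 0) 2 * PySem.List.pyGetD S ((2+(t:Int))-2) 0])
      [1, max k 0]
    = (List.range (c+2)).map (pvSeq k) := by
  intro c; induction c with
  | zero => simp [List.range_succ]; exact ⟨rfl, rfl⟩
  | succ s ih =>
      rw [show List.range (s+1) = List.range s ++ [s] from List.range_succ,
          List.foldl_append, ih]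
      simp only [List.foldl_cons, List.foldl_nil]
      have h1 : ((2+(s:Int))-1) = (((s+1 : Nat)) : Int) := by omega
      have h2 : ((2+(s:Int))-2) = ((s : Nat) : Int) := by omega
      rw [h1, h2, PySem.List.pyGetD_natCast, PySem.List.pyGetD_natCast,
          PySem.List.getD_map_range _ _ _ _ (by omega : s + 1 < s + 2),
          PySem.List.getD_map_range _ _ _ _ (by omega : s < s + 2)]
      rw [show (List.range (s+1+2)).map (pvSeq k)
            = (List.range (s+2)).map (pvSeq k) ++ [pvSeq k (s+2)] by
          rw [List.range_succ, List.map_append]; rfl]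
      rfl

theorem pv_Slist (k : Int) (c : Nat) :
    (List.map (fun (t : Nat) => (2:Int) + (t:Int)) (List.range c)).foldl
      (fun S i => S ++ [PySem.Int.floordiv (max k 0 + 1) 2 * PySem.List.pyGetD S (i-1) 0 +
          2 * PySem.Int.floordiv (max k 0) 2 * PySem.List.pyGetD S (i-2) 0])
      [1, max k 0]
    = (List.range (c+2)).map (pvSeq k) := by
  rw [List.foldl_map]; exact pv_SAux k c

-- top-level characterization of port A
theorem pv_tableA (n k : Int) (hn : 1 ≤ n) :
    dispadjg n k
      = ((List.range (n.toNat+1)).map (pvRowF k), pvSum (pvRowF k n.toNat)) := by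
  have hL : (n+1).toNat = n.toNat + 1 := by omega
  have hN : 1 ≤ n.toNat := by omega
  simp only [dispadjg]
  rw [show (fun (_ : Int) => PySem.List.pyRepeat [(0:Int)] k)
        = (fun (_ : Int) => List.replicate k.toNat 0) by
      funext x; rw [PySem.List.pyRepeat_singleton]]
  rw [List.map_const', PySem.List.length_pyRange_one]
  rw [show ((n+1) - 0).toNat = (n.toNat - 1) + 2 by omega,
      List.replicate_succ, List.replicate_succ]
  rw [pv_onesLoop k _ _]
  have hfront : (List.replicate k.toNat (0:Int)) :: List.replicate k.toNat 1
        :: List.replicate (n.toNat - 1) (List.replicate k.toNat 0)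
      = (List.range 2).map (pvRowF k)
        ++ List.replicate (n.toNat - 1) (List.replicate k.toNat 0) := by
    rw [show (List.range 2).map (pvRowF k) = [pvRowF k 0, pvRowF k 1] by rfl]
    rfl
  rw [hfront, PySem.List.pyRange_one 2 (n+1), List.foldl_map,
      show ((n+1) - 2).toNat = n.toNat - 1 by omega]
  rw [pv_outerA k (n.toNat - 1) (n.toNat - 1) (le_refl _)]
  rw [show (n.toNat - 1) + 2 = n.toNat + 1 by omega, Nat.sub_self, List.replicate_zero,
      List.append_nil]
  rw [show n = ((n.toNat : Nat) : Int) by omega, PySem.List.pyGetD_natCast]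
  simp only [Int.toNat_natCast]
  rw [PySem.List.getD_map_range _ _ _ _ (by omega : n.toNat < n.toNat + 1)]

-- the row function of B, applied to a Nat index, is the canonical row
theorem pv_rowFun (k : Int) (N i : Nat) (hi : i ≤ N) :
    (if ((i:Nat):Int) = 0 then PySem.List.pyRepeat [(0:Int)] (max k 0)
     else if ((i:Nat):Int) = 1 then PySem.List.pyRepeat [(1:Int)] (max k 0)
     else (PySem.List.pyRange 0 (max k 0) 1).map
       (fun j => if PySem.Int.mod j 2 ≠ 0 then
           2 * PySem.List.pyGetD ((List.range ((N-1)+2)).map (pvSeq k)) (((i:Nat):Int)-2) 0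
         else PySem.List.pyGetD ((List.range ((N-1)+2)).map (pvSeq k)) (((i:Nat):Int)-1) 0))
    = pvRowF k i := by
  have hmax : (max k 0).toNat = k.toNat := by omega
  match i with
  | 0 =>
      rw [if_pos (by norm_num), PySem.List.pyRepeat_singleton, hmax]; rfl
  | 1 =>
      rw [if_neg (by norm_num), if_pos (by norm_num), PySem.List.pyRepeat_singleton, hmax]; rfl
  | (t+2) =>
      rw [if_neg (by omega), if_neg (by omega)]
      have h1 : ((((t+2 : Nat)) : Int) - 1) = (((t+1 : Nat)) : Int) := by omega
      have h2 : ((((t+2 : Nat)) : Int) - 2) = ((t : Nat) : Int) := by omega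
      rw [h1, h2, PySem.List.pyGetD_natCast, PySem.List.pyGetD_natCast,
          PySem.List.getD_map_range _ _ _ _ (by omega : t + 1 < (N-1)+2),
          PySem.List.getD_map_range _ _ _ _ (by omega : t < (N-1)+2),
          pv_max_eq_cast, PySem.List.pyRange_zero_natCast, List.map_map]
      rw [show pvRowF k (t+2) = (List.range k.toNat).map
            (fun j => if j % 2 = 1 then 2 * pvSeq k t else pvSeq k (t+1)) from rfl]
      apply List.map_congr_left
      intro j _
      simp only [Function.comp]
      rw [pv_mod2]
      by_cases hj : j % 2 = 1
      · rw [if_pos (by omega : ((j % 2 : Nat) : Int) ≠ 0), if_pos hj]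
      · rw [if_neg (by omega : ¬ ((j % 2 : Nat) : Int) ≠ 0), if_neg hj]

-- top-level characterization of port B
theorem pv_tableB (n k : Int) (hn : 0 ≤ n) :
    dispadjg_alt n k
      = ((List.range (n.toNat+1)).map (pvRowF k), pvSum (pvRowF k n.toNat)) := by
  simp only [dispadjg_alt]
  rw [PySem.List.pyRange_one 2 (n+1),
      show ((n+1) - 2).toNat = n.toNat - 1 by omega,
      pv_Slist k (n.toNat - 1)]
  rw [show n + 1 = (((n.toNat + 1 : Nat)) : Int) by omega, PySem.List.pyRange_zero_natCast,
      List.map_map]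
  have hmap : (List.range (n.toNat+1)).map
        ((fun i =>
          if i = 0 then PySem.List.pyRepeat [(0:Int)] (max k 0)
          else if i = 1 then PySem.List.pyRepeat [(1:Int)] (max k 0)
          else (PySem.List.pyRange 0 (max k 0) 1).map
            (fun j => if PySem.Int.mod j 2 ≠ 0 then
                2 * PySem.List.pyGetD ((List.range ((n.toNat-1)+2)).map (pvSeq k)) (i-2) 0
              else PySem.List.pyGetD ((List.range ((n.toNat-1)+2)).map (pvSeq k)) (i-1) 0))
          ∘ (fun (j : Nat) => (j : Int)))
      = (List.range (n.toNat+1)).map (pvRowF k) := by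
    apply List.map_congr_left
    intro i hi
    rw [List.mem_range] at hi
    exact pv_rowFun k n.toNat i (by omega)
  rw [hmap]
  rw [show n = ((n.toNat : Nat) : Int) by omega, PySem.List.pyGetD_natCast]
  simp only [Int.toNat_natCast]
  rw [PySem.List.getD_map_range _ _ _ _ (by omega : n.toNat < n.toNat + 1)]

-- the remaining admitted input: n = 0 (then Pre_ forces k ≤ 0, the table is [[]])
theorem pv_zeroA (k : Int) (hk : k ≤ 0) : dispadjg 0 k = ([[]], 0) := by
  have hm : k.toNat = 0 := Int.toNat_of_nonpos hk
  have hr0 : PySem.List.pyRange 0 k = [] := PySem.List.pyRange_one_eq_nil hk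
  have hr2 : PySem.List.pyRange 2 (0+1) = [] := PySem.List.pyRange_one_eq_nil (by norm_num)
  simp only [dispadjg, hr0, hr2, List.foldl_nil]
  rw [show (0:Int) + 1 = (((1:Nat)) : Int) by norm_num, PySem.List.pyRange_zero_natCast]
  simp [PySem.List.pyRepeat_singleton, hm, PySem.List.pyGetD, PySem.List.pyIdx?,
        PySem.List.pyGet?, pvSum]

-- ===== VERDICT (by name: the statement is the Claim_ definition above) =====
theorem dispadjg_spec : Claim_equal_dispadjg := by
  intro n k _ hpre
  unfold Spec_dispadjg
  rcases hpre with ⟨hn0, hnk⟩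
  by_cases hn : 1 ≤ n
  · rw [pv_tableA n k hn, pv_tableB n k (by omega)]
  · have hn' : n = 0 := by omega
    have hk : k ≤ 0 := by by_contra h; exact hn (hnk (by omega))
    subst hn'
    rw [pv_zeroA k hk, pv_tableB 0 k (by omega)]
    have hm : k.toNat = 0 := Int.toNat_of_nonpos hk
    simp [pvRowF, hm, pvSum]
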